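-- pv_equiv track=rewrite | github.com/shrutikatayde/TECHNICAL-TRAINING-PYTHON | 14_medio-cine.py | minimum_days
-- ===== SOURCE A (Python) =====
-- def minimum_days(N, L, ages):
--     ages.sort()  # Sort the ages in ascending order
--     high_risk_count = 0
--     non_high_risk_count = 0
--     # Count the number of high-risk and non-high-risk individuals
--     for age in ages:
--         if age <= 10 or age >= 81:
--             high_risk_count += 1
--         else:
--             non_high_risk_count += 1
--     days = 0
--     while high_risk_count > 0 or non_high_risk_count > 0:
--         capsules = L  # Number of capsules available for the day
--         # Distribute capsules to high-risk individuals first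
--         while capsules > 0 and high_risk_count > 0:
--             capsules -= 1
--             high_risk_count -= 1
--         # Distribute capsules to non-high-risk individuals
--         while capsules > 0 and non_high_risk_count > 0:
--             capsules -= 1
--             non_high_risk_count -= 1
--         days += 1
--     return days
-- ===== SOURCE B (Python) =====
-- def minimum_days(N, L, ages):
--     # ceil(len(ages)/L): each day exactly min(L, remaining) people are served,
--     # regardless of risk group. (A also sorts `ages` in place; B does not mutate it —
--     # the equivalence claimed is about the return value only.)
--     if not ages:
--         return 0
--     return -(-len(ages) // L)
-- ===== Notes on version B (the rewrite author's own statement) =====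
-- stated objective: faster
-- what changed: Replaced the sort, the risk-group counting pass and the day-by-day capsule simulation by the closed form ceil(len(ages)/L): the risk split only changes who gets served first, never how many days are needed.
import Mathlib
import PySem

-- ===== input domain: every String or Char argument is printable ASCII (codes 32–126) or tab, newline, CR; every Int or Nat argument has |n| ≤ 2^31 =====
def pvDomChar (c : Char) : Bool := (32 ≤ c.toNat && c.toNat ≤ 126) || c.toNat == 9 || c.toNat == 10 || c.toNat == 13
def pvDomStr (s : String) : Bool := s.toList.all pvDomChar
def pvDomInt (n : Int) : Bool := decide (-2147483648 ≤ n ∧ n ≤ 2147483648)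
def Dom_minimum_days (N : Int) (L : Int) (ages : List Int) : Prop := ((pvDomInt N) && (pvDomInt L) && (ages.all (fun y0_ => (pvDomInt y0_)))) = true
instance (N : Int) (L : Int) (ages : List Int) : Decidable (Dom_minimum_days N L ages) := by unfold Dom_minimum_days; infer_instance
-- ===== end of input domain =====

-- B replaces A's sort + counting pass + day-by-day simulation by the closed form
-- ceil(len(ages)/L) (faster). A sorts `ages` in place; the equivalence is about the
-- return value only.

-- ===== PORT A =====
-- inner `while capsules > 0 and <count> > 0: capsules -= 1; <count> -= 1`
def pvDistWhile (capsules cnt : Int) : Int × Int :=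
  if 0 < capsules ∧ 0 < cnt then pvDistWhile (capsules - 1) (cnt - 1)
  else (capsules, cnt)
termination_by cnt.toNat
decreasing_by omega

-- outer `while high_risk_count > 0 or non_high_risk_count > 0` loop; the fuel only
-- totalizes the loop (when 1 ≤ L each day removes at least one person, so fuel
-- (h+n).toNat never runs out; when L ≤ 0 the Python loop diverges, excluded by Pre_).
def pvDayLoop (fuel : Nat) (L h n days : Int) : Int :=
  match fuel with
  | 0 => days
  | fuel + 1 =>
    if 0 < h ∨ 0 < n then
      let p1 := pvDistWhile L h
      let p2 := pvDistWhile p1.1 n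
      pvDayLoop fuel L p1.2 p2.2 (days + 1)
    else days

-- the counting for-loop over the sorted list
def pvCount (xs : List Int) : Int × Int :=
  xs.foldl (fun (s : Int × Int) age =>
    if age ≤ 10 ∨ 81 ≤ age then (s.1 + 1, s.2) else (s.1, s.2 + 1)) (0, 0)

def minimum_days (N : Int) (L : Int) (ages : List Int) : Int :=
  let s := PySem.List.sorted ages (fun x => x) false
  let c := pvCount s
  pvDayLoop (c.1 + c.2).toNat L c.1 c.2 0

-- ===== PORT B =====
def minimum_days_alt (N : Int) (L : Int) (ages : List Int) : Int :=
  if ages = [] then 0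
  else -(PySem.Int.floordiv (-(ages.length : Int)) L)

-- ===== PRECONDITION & SPEC =====
-- Pre_ excludes nonempty `ages` with L ≤ 0: there A's day loop never removes anyone
-- and diverges (returns nothing).
def Pre_minimum_days (N : Int) (L : Int) (ages : List Int) : Prop :=
  ages = [] ∨ 1 ≤ L
instance (N : Int) (L : Int) (ages : List Int) : Decidable (Pre_minimum_days N L ages) := by
  unfold Pre_minimum_days; infer_instance

def pvWitness_minimum_days : Int × Int × List Int := (5, 2, [3, 50, 90, 42, 7])

def Spec_minimum_days (N : Int) (L : Int) (ages : List Int) (out : Int) : Prop := out = minimum_days_alt N L ages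
instance (N : Int) (L : Int) (ages : List Int) (out : Int) : Decidable (Spec_minimum_days N L ages out) := by unfold Spec_minimum_days; infer_instance

-- ===== CLAIM (what is proved, stated in full; the proofs are below) =====
def Claim_equal_minimum_days : Prop := ∀ (N : Int) (L : Int) (ages : List Int), Dom_minimum_days N L ages → Pre_minimum_days N L ages → Spec_minimum_days N L ages (minimum_days N L ages)

-- ===== LEMMAS AND PROOFS =====

-- the counting pass: totals sum to the list length and stay nonnegative
theorem pvCount_go (xs : List Int) (s : Int × Int) :
    (xs.foldl (fun (s : Int × Int) age =>
      if age ≤ 10 ∨ 81 ≤ age then (s.1 + 1, s.2) else (s.1, s.2 + 1)) s).1 +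
    (xs.foldl (fun (s : Int × Int) age =>
      if age ≤ 10 ∨ 81 ≤ age then (s.1 + 1, s.2) else (s.1, s.2 + 1)) s).2
      = s.1 + s.2 + xs.length ∧
    s.1 ≤ (xs.foldl (fun (s : Int × Int) age =>
      if age ≤ 10 ∨ 81 ≤ age then (s.1 + 1, s.2) else (s.1, s.2 + 1)) s).1 ∧
    s.2 ≤ (xs.foldl (fun (s : Int × Int) age =>
      if age ≤ 10 ∨ 81 ≤ age then (s.1 + 1, s.2) else (s.1, s.2 + 1)) s).2 := by
  induction xs generalizing s with
  | nil => simp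
  | cons a t ih =>
    simp only [List.foldl_cons, List.length_cons]
    split
    · have h := ih (s.1 + 1, s.2); push_cast at *; constructor
      · omega
      · exact ⟨by linarith [h.2.1], h.2.2⟩
    · have h := ih (s.1, s.2 + 1); push_cast at *; constructor
      · omega
      · exact ⟨h.2.1, by linarith [h.2.2]⟩

-- closed form of the inner while loops
theorem pvDistWhile_eq (c m : Int) :
    pvDistWhile c m =
      if 0 < c ∧ 0 < m then (c - min c m, m - min c m) else (c, m) := by
  fun_induction pvDistWhile c m with
  | case1 c m h ih =>
    rw [ih]
    rcases le_total c m with hcm | hcm <;> split_ifs <;> simp_all <;>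
      constructor <;> omega
  | case2 c m h => simp [h]

-- ceil(0 / L) = 0
theorem pvCeil_zero (L : Int) (hL : 1 ≤ L) :
    -(PySem.Int.floordiv (-(0 : Int)) L) = 0 := by
  rw [PySem.Int.floordiv_eq_ediv_of_pos (by omega)]
  simp

-- one simulated day with m > 0 people left accounts for exactly one unit of the ceiling
theorem pvCeil_step (L m : Int) (hL : 1 ≤ L) (hm : 0 < m) :
    -(PySem.Int.floordiv (-(m - min L m)) L) = -(PySem.Int.floordiv (-m) L) - 1 := by
  have hq := (PySem.Int.neg_floordiv_neg_eq_iff_of_pos (a := m)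
      (b := L) (q := -(PySem.Int.floordiv (-m) L)) (by omega)).mp rfl
  set q := -(PySem.Int.floordiv (-m) L) with hqdef
  rcases le_total L m with h | h
  · -- a full day of L capsules is used
    rw [min_eq_left h]
    refine (PySem.Int.neg_floordiv_neg_eq_iff_of_pos (by omega)).mpr ?_
    have e1 : (q - 1 - 1) * L = (q - 1) * L - L := by ring
    have e2 : (q - 1) * L = q * L - L := by ring
    constructor <;> [linarith [hq.1]; linarith [hq.2]]
  · -- the last day: m ≤ L people remain, q = 1
    rw [min_eq_right h]
    have hq1 : q = 1 := by
      by_contra hne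
      rcases lt_or_gt_of_ne hne with hlt | hgt
      · have : q * L ≤ 0 * L := by
          apply mul_le_mul_of_nonneg_right (by omega) (by omega)
        simp at this; omega
      · have : 1 * L ≤ (q - 1) * L := by
          apply mul_le_mul_of_nonneg_right (by omega) (by omega)
        simp at this; omega
    rw [hq1]
    simpa using pvCeil_zero L hL

-- the day loop computes days + ceil((h+n)/L) when the fuel covers h+n
theorem pvDayLoop_eq (fuel : Nat) (L h n days : Int) (hL : 1 ≤ L)
    (hh : 0 ≤ h) (hn : 0 ≤ n) (hfuel : (h + n).toNat ≤ fuel) :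
    pvDayLoop fuel L h n days = days + -(PySem.Int.floordiv (-(h + n)) L) := by
  induction fuel generalizing h n days with
  | zero =>
    have h0 : h = 0 ∧ n = 0 := by omega
    simp only [pvDayLoop, h0.1, h0.2]
    rw [show (-(0 + 0 : Int)) = 0 by ring, PySem.Int.floordiv_eq_ediv_of_pos (by omega)]
    simp
  | succ fuel ih =>
    by_cases hcond : 0 < h ∨ 0 < n
    · have hm : 0 < h + n := by omega
      simp only [pvDayLoop, if_pos hcond]
      rw [pvDistWhile_eq, pvDistWhile_eq]
      -- unfold the two inner whiles case by case
      rcases Classical.em (0 < h) with hh1 | hh1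
      · rw [if_pos ⟨by omega, hh1⟩]
        set k1 := min L h with hk1
        rcases Classical.em (0 < L - k1 ∧ 0 < n) with hc2 | hc2
        · rw [if_pos hc2]
          set k2 := min (L - k1) n with hk2
          have htot : k1 + k2 = min L (h + n) := by omega
          rw [ih (h - k1) (n - k2) (days + 1) (by omega) (by omega) (by omega)]
          have : h - k1 + (n - k2) = (h + n) - min L (h + n) := by omega
          rw [this, pvCeil_step L (h + n) hL hm]; ring
        · rw [if_neg hc2]
          have htot : k1 = min L (h + n) := by omega
          rw [ih (h - k1) n (days + 1) (by omega) hn (by omega)]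
          have : h - k1 + n = (h + n) - min L (h + n) := by omega
          rw [this, pvCeil_step L (h + n) hL hm]; ring
      · rw [if_neg (by omega)]
        have hn1 : 0 < n := by omega
        rw [if_pos ⟨by omega, hn1⟩]
        set k2 := min L n with hk2
        have htot : k2 = min L (h + n) := by omega
        rw [ih h (n - k2) (days + 1) hh (by omega) (by omega)]
        have : h + (n - k2) = (h + n) - min L (h + n) := by omega
        rw [this, pvCeil_step L (h + n) hL hm]; ring
    · simp only [pvDayLoop, if_neg hcond]
      have h0 : h = 0 ∧ n = 0 := by omega
      simp only [h0.1, h0.2]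
      rw [show (-(0 + 0 : Int)) = 0 by ring, PySem.Int.floordiv_eq_ediv_of_pos (by omega)]
      simp

-- ===== VERDICT (by name: the statement is the Claim_ definition above) =====
theorem minimum_days_spec : Claim_equal_minimum_days := by
  intro N L ages _ hpre
  unfold Spec_minimum_days minimum_days minimum_days_alt
  rcases Classical.em (ages = []) with hnil | hnil
  · subst hnil
    simp [pvCount, pvDayLoop, PySem.List.sorted]
  · rcases hpre with h | hL
    · exact absurd h hnil
    rw [if_neg hnil]
    set s := PySem.List.sorted ages (fun x => x) false with hs
    have hlen : (s.length : Int) = (ages.length : Int) := by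
      simp [hs, PySem.List.length_sorted]
    have hc := pvCount_go s (0, 0)
    have hsum : (pvCount s).1 + (pvCount s).2 = (ages.length : Int) := by
      unfold pvCount; rw [hc.1]; push_cast; omega
    have hh : 0 ≤ (pvCount s).1 := hc.2.1
    have hn : 0 ≤ (pvCount s).2 := hc.2.2
    rw [pvDayLoop_eq _ _ _ _ _ hL hh hn (le_refl _), hsum]
    ring
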